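-- pv_equiv track=rewrite | github.com/karikris/intermine314 | benchmarks/runners/phase0_parallel_baselines.py | _normalize_case_modes
-- ===== SOURCE A (Python) =====
-- VALID_CASE_MODES = ("ordered", "unordered", "window")
--
-- def _normalize_case_modes(value: str) -> tuple[str, ...]:
--     raw = str(value or "").strip().lower()
--     parts = [token.strip().lower() for token in raw.split(",") if token.strip()]
--     if not parts:
--         parts = list(VALID_CASE_MODES)
--     deduped: list[str] = []
--     for mode in parts:
--         if mode not in VALID_CASE_MODES:
--             choices = ", ".join(VALID_CASE_MODES)
--             raise ValueError(f"modes must be comma-separated values from: {choices}")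
--         if mode not in deduped:
--             deduped.append(mode)
--     return tuple(deduped)
-- ===== SOURCE B (Python) =====
-- VALID_CASE_MODES = ("ordered", "unordered", "window")
--
-- def _normalize_case_modes(value: str) -> tuple[str, ...]:
--     raw = str(value or "").strip().lower()
--     parts = [token.strip().lower() for token in raw.split(",") if token.strip()]
--     if not parts:
--         parts = list(VALID_CASE_MODES)
--     # validate by a single set-subset test instead of A's per-element scan-and-raise loop
--     if not set(parts).issubset(VALID_CASE_MODES):
--         choices = ", ".join(VALID_CASE_MODES)
--         raise ValueError(f"modes must be comma-separated values from: {choices}")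
--     # reconstruct the order-deduped result: take the SET of tokens and sort it by
--     # first-occurrence index; correct because first-occurrence dedup is exactly the
--     # distinct elements arranged in increasing order of their first index, and
--     # parts.index is injective on distinct elements, so the sort is deterministic
--     return tuple(sorted(set(parts), key=parts.index))
-- ===== Notes on version B (the rewrite author's own statement) =====
-- stated objective: alternative
-- what changed: A's single loop that interleaves per-token validation (raise on first bad token) with incremental list-membership dedup is replaced by a set-subset validity test followed by reconstructing the deduped tuple as sorted(set(parts), key=parts.index) - a sort of the distinct tokens by first-occurrence index instead of any sequential accumulation.
import Mathlib
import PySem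

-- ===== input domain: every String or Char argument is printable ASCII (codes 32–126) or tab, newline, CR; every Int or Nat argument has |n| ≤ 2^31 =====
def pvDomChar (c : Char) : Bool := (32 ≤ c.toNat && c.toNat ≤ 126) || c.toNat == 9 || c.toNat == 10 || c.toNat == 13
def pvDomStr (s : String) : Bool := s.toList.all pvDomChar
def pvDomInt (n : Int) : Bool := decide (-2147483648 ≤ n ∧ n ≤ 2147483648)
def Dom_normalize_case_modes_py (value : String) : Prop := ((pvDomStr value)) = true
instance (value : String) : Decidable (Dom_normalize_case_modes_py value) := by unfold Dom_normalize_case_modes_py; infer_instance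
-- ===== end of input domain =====

-- B replaces A's validate-and-dedup loop by a set-subset validity test plus a sort of the
-- distinct tokens by first-occurrence index; equivalence is about the return value on inputs
-- where A does not raise.

-- ===== PORT A =====
-- VALID_CASE_MODES = ("ordered", "unordered", "window")
def pvValidModes : List String := ["ordered", "unordered", "window"]

-- A's loop: validate each mode and append unseen ones; on an invalid mode Python
-- raises ValueError — excluded by Pre_, the port returns [] there.
def pvLoopA : List String → List String → List String
  | ded, [] => ded
  | ded, m :: rest =>
    if m ∈ pvValidModes then
      if m ∈ ded then pvLoopA ded rest else pvLoopA (ded ++ [m]) rest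
    else []

def normalize_case_modes_py (value : String) : List String :=
  let raw := PySem.Str.lower (PySem.Str.strip (if value == "" then "" else value))
  let parts := ((((PySem.Str.split? raw ",").getD [])).filter (fun t => PySem.Str.strip t != "")).map
    (fun t => PySem.Str.lower (PySem.Str.strip t))
  let parts := if parts.isEmpty then pvValidModes else parts
  pvLoopA [] parts

-- ===== PORT B =====
-- parts.index p is PySem.List.index?; every sorted element is a member of parts, so the
-- '.getD 0' default is never used and the key is exact; the key is injective on the distinct
-- elements (distinct first-occurrence indices), so the sort of the set is deterministic.
def normalize_case_modes_py_alt (value : String) : List String :=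
  let raw := PySem.Str.lower (PySem.Str.strip (if value == "" then "" else value))
  let parts := ((((PySem.Str.split? raw ",").getD [])).filter (fun t => PySem.Str.strip t != "")).map
    (fun t => PySem.Str.lower (PySem.Str.strip t))
  let parts := if parts.isEmpty then pvValidModes else parts
  if PySem.Set.issubset (PySem.Set.ofList parts) pvValidModes then
    PySem.List.sorted (PySem.Set.ofList parts) (fun p => ((PySem.List.index? parts p).getD 0 : Nat)) false
  else []  -- Python raises ValueError here; excluded by Pre_

-- ===== PRECONDITION & SPEC =====
-- Pre_ excludes exactly the inputs on which A raises ValueError: some nonempty token is not a valid case mode.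
def Pre_normalize_case_modes_py (value : String) : Prop :=
  ∀ t ∈ ((PySem.Str.split? (PySem.Str.lower (PySem.Str.strip (if value == "" then "" else value))) ",").getD []),
    PySem.Str.strip t ≠ "" → PySem.Str.lower (PySem.Str.strip t) ∈ pvValidModes
instance (value : String) : Decidable (Pre_normalize_case_modes_py value) := by
  unfold Pre_normalize_case_modes_py; infer_instance
def pvWitness_normalize_case_modes_py : String := "Ordered, window ,ordered"
def Spec_normalize_case_modes_py (value : String) (out : List String) : Prop := out = normalize_case_modes_py_alt value
instance (value : String) (out : List String) : Decidable (Spec_normalize_case_modes_py value out) := by unfold Spec_normalize_case_modes_py; infer_instance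

-- ===== CLAIM (what is proved, stated in full; the proofs are below) =====
def Claim_equal_normalize_case_modes_py : Prop := ∀ (value : String), Dom_normalize_case_modes_py value → Pre_normalize_case_modes_py value → Spec_normalize_case_modes_py value (normalize_case_modes_py value)

-- ===== LEMMAS AND PROOFS =====
lemma pvLoopA_eq_foldl (parts : List String) (acc : List String)
    (h : ∀ m ∈ parts, m ∈ pvValidModes) :
    pvLoopA acc parts = parts.foldl PySem.Set.add acc := by
  induction parts generalizing acc with
  | nil => rfl
  | cons m rest ih =>
    have hm : m ∈ pvValidModes := h m (by simp)
    have hrest : ∀ x ∈ rest, x ∈ pvValidModes := fun x hx => h x (by simp [hx])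
    by_cases hmem : m ∈ acc
    · simp [pvLoopA, hm, hmem, ih _ hrest]
    · simp [pvLoopA, hm, hmem, ih _ hrest]

-- the distinct elements set(xs) is arranged in strictly increasing order of first-occurrence index
lemma ofList_pairwise_index (xs : List String) :
    (PySem.Set.ofList xs).Pairwise
      (fun a b => ((PySem.List.index? xs a).getD 0 : Nat) < (PySem.List.index? xs b).getD 0) := by
  induction xs using List.reverseRecOn with
  | nil => simp [PySem.Set.ofList]
  | append_singleton xs x ih =>
    have hof : PySem.Set.ofList (xs ++ [x]) = PySem.Set.add (PySem.Set.ofList xs) x := by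
      rw [PySem.Set.ofList_eq_foldl, PySem.Set.ofList_eq_foldl, List.foldl_append]; rfl
    by_cases hx : x ∈ xs
    · have hxx : x ∈ PySem.Set.ofList xs := by simp [PySem.Set.mem_ofList, hx]
      rw [hof, PySem.Set.add_of_mem hxx]
      refine ih.imp_of_mem ?_
      intro a b ha hb hab
      have ha' : a ∈ xs := (PySem.Set.mem_ofList _ _).mp ha
      have hb' : b ∈ xs := (PySem.Set.mem_ofList _ _).mp hb
      rwa [PySem.List.index?_append_of_mem _ ha', PySem.List.index?_append_of_mem _ hb']
    · have hxx : x ∉ PySem.Set.ofList xs := by simp [PySem.Set.mem_ofList, hx]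
      rw [hof, PySem.Set.add_of_not_mem hxx, List.pairwise_append]
      refine ⟨?_, by simp, ?_⟩
      · refine ih.imp_of_mem ?_
        intro a b ha hb hab
        have ha' : a ∈ xs := (PySem.Set.mem_ofList _ _).mp ha
        have hb' : b ∈ xs := (PySem.Set.mem_ofList _ _).mp hb
        rwa [PySem.List.index?_append_of_mem _ ha', PySem.List.index?_append_of_mem _ hb']
      · intro a ha b hb
        have ha' : a ∈ xs := (PySem.Set.mem_ofList _ _).mp ha
        have hb' : b = x := by simpa using hb
        subst hb'
        rw [PySem.List.index?_append_of_mem _ ha',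
            PySem.List.index?_append_singleton_self _ _ hx]
        have hsome : (PySem.List.index? xs a).isSome :=
          (PySem.List.index?_isSome_iff _ _).mpr ha'
        obtain ⟨k, hk⟩ := Option.isSome_iff_exists.mp hsome
        obtain ⟨hlt, -, -⟩ := PySem.List.getElem_of_index?_eq_some hk
        rw [hk]
        simpa using hlt

-- ===== VERDICT (by name: the statement is the Claim_ definition above) =====
theorem normalize_case_modes_py_spec : Claim_equal_normalize_case_modes_py := by
  intro value _ hpre
  unfold Spec_normalize_case_modes_py normalize_case_modes_py normalize_case_modes_py_alt
  set raw := PySem.Str.lower (PySem.Str.strip (if value == "" then "" else value)) with hraw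
  set parts0 := ((((PySem.Str.split? raw ",").getD [])).filter (fun t => PySem.Str.strip t != "")).map
    (fun t => PySem.Str.lower (PySem.Str.strip t)) with hparts0
  set parts := if parts0.isEmpty then pvValidModes else parts0 with hparts
  have hall : ∀ m ∈ parts, m ∈ pvValidModes := by
    intro m hmem
    rw [hparts] at hmem
    split_ifs at hmem with he
    · exact hmem
    · rw [hparts0] at hmem
      rcases List.mem_map.mp hmem with ⟨t, ht, rfl⟩
      rcases List.mem_filter.mp ht with ⟨htmem, htne⟩
      exact hpre t htmem (by simpa using htne)
  have hsub : PySem.Set.issubset (PySem.Set.ofList parts) pvValidModes = true := by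
    simp only [PySem.Set.issubset, List.all_eq_true]
    intro p hp
    simpa using hall p ((PySem.Set.mem_ofList _ _).mp hp)
  dsimp only
  rw [pvLoopA_eq_foldl parts [] hall, ← hparts0, ← hparts, hsub]
  simp only [if_true]
  rw [PySem.List.sorted_eq_of_perm_of_pairwise_lt _ _ _ (List.Perm.refl _) (ofList_pairwise_index parts),
      PySem.Set.ofList_eq_foldl]
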